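-- pv_equiv track=rewrite | github.com/C0DIC/WalleBot | Source/Utils/ReadAction.py | readFirstAction
-- ===== SOURCE A (Python) =====
-- def readFirstAction(text):
--     new_text = ''
--     for i in text:
--         if i == '(':
--             new_text += i
--         if i != ')':
--             new_text += i
--         else:
--             break
--     return new_text
-- ===== SOURCE B (Python) =====
-- def readFirstAction(text):
--     prefix = text.partition(')')[0]
--     return prefix.replace('(', '((')
-- ===== Notes on version B (the rewrite author's own statement) =====
-- stated objective: idiomatic
-- what changed: Replaces the explicit per-character loop with break by two library calls: take the prefix before the first close paren via str.partition, then double every open paren via str.replace.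
import Mathlib
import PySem

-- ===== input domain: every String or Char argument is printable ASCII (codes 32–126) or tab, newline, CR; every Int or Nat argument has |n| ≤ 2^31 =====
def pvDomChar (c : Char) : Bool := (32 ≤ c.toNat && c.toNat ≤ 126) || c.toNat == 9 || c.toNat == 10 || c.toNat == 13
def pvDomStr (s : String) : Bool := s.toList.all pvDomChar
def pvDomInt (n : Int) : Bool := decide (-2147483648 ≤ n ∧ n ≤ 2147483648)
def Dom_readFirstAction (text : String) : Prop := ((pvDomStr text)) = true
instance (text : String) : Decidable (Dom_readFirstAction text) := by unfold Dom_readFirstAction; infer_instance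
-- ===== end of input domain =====

-- B replaces A's explicit character loop (with break) by two library calls
-- (prefix before the first ')' via partition, then doubling '(' via replace); idiomatic, same cost.

-- ===== PORT A =====
-- A's for-loop with break, as structural recursion over the characters with the same branch order.
def readFirstActionLoop : List Char → List Char
  | [] => []
  | c :: rest =>
    let pre : List Char := if c = '(' then [c] else []
    if c ≠ ')' then pre ++ c :: readFirstActionLoop rest else pre

def readFirstAction (text : String) : String :=
  String.ofList (readFirstActionLoop text.toList)

-- ===== PORT B =====
def readFirstAction_alt (text : String) : String :=
  let prefixPart : String := String.ofList (text.toList.takeWhile (fun c => c ≠ ')'))  -- text.partition(')')[0]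
  PySem.Str.replace prefixPart "(" "(("

-- ===== PRECONDITION & SPEC =====
def Spec_readFirstAction (text : String) (out : String) : Prop := out = readFirstAction_alt text
instance (text : String) (out : String) : Decidable (Spec_readFirstAction text out) := by unfold Spec_readFirstAction; infer_instance

-- ===== CLAIM (what is proved, stated in full; the proofs are below) =====
def Claim_equal_readFirstAction : Prop := ∀ (text : String), Dom_readFirstAction text → Spec_readFirstAction text (readFirstAction text)

-- ===== LEMMAS AND PROOFS =====

-- single-char replace '(' → '((' acts as a flatMap doubling '('
def pvDouble (l : List Char) : List Char := l.flatMap (fun c => if c = '(' then ['(', '('] else [c])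

lemma replace_go_double (fuel : Nat) (l acc : List Char) (h : l.length ≤ fuel) :
    PySem.Chars.replace.go ['('] ['(', '('] fuel l acc = acc.reverse ++ pvDouble l := by
  induction fuel generalizing l acc with
  | zero =>
    cases l with
    | nil => simp [PySem.Chars.replace.go, pvDouble]
    | cons c t => simp at h
  | succ n ih =>
    cases l with
    | nil => simp [PySem.Chars.replace.go, pvDouble]
    | cons c t =>
      simp only [List.length_cons, Nat.succ_le_succ_iff] at h
      by_cases hc : c = '('
      · subst hc
        rw [PySem.Chars.replace.go, if_pos (show ((['('] : List Char).isPrefixOf ('(' :: t)) = true from by simp [List.isPrefixOf])]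
        rw [ih _ _ (by simpa using h)]
        simp [pvDouble]
      · rw [PySem.Chars.replace.go,
            if_neg (show ¬ (((['('] : List Char).isPrefixOf (c :: t)) = true) from by
              simp [List.isPrefixOf]; exact fun hh => hc hh.symm)]
        rw [ih _ _ h]
        simp [pvDouble, hc]

lemma replace_double (l : List Char) :
    PySem.Chars.replace l ['('] ['(', '('] = pvDouble l := by
  rw [PySem.Chars.replace]
  simp only [List.isEmpty_cons]
  exact replace_go_double l.length l [] le_rfl

-- A's loop equals "double '(' in the prefix before the first ')'"
lemma loop_eq_double_takeWhile (l : List Char) :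
    readFirstActionLoop l = pvDouble (l.takeWhile (fun c => c ≠ ')')) := by
  induction l with
  | nil => simp [readFirstActionLoop, pvDouble]
  | cons c t ih =>
    by_cases hc : c = ')'
    · subst hc
      simp [readFirstActionLoop, List.takeWhile, pvDouble]
    · rw [readFirstActionLoop, List.takeWhile_cons]
      by_cases hp : c = '(' <;> simp [hp, hc, ih, pvDouble]

-- ===== VERDICT (by name: the statement is the Claim_ definition above) =====
theorem readFirstAction_spec : Claim_equal_readFirstAction := by
  intro text _
  unfold Spec_readFirstAction readFirstAction readFirstAction_alt
  simp only [PySem.Str.replace, String.toList_ofList]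
  rw [show ("(" : String).toList = ['('] from rfl,
      show ("((" : String).toList = ['(', '('] from rfl,
      replace_double, loop_eq_double_takeWhile]
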